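-- pv_equiv track=rewrite | github.com/d14405011-sudo/2026-python | weeks/week-07/solutions/1114405011/10071/q10071-Hand-typed.py | count_six
-- ===== SOURCE A (Python) =====
-- from collections import Counter
--
-- def count_six(values: list[int]) -> int:
--     s3 = Counter()
--     for a in values:
--         for b in values:
--             ab = a + b
--             for c in values:
--                 s3[ab + c] += 1
--     s2 = Counter()
--     for d in values:
--         for e in values:
--             s2[d + e] += 1
--     total = 0
--     for x, cx in s3.items():
--         m = 0
--         for f in values:
--             m += s2.get(f - x, 0)
--         total += cx * m
--     return total
-- ===== SOURCE B (Python) =====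
-- from collections import Counter
--
-- def count_six(values: list[int]) -> int:
--     # pair sums, counted once: O(n^2)
--     s2 = Counter()
--     for d in values:
--         for e in values:
--             s2[d + e] += 1
--     # triple-sum counts by convolving the pair-sum counter with the values
--     s3 = Counter()
--     for x, c in s2.items():
--         for a in values:
--             s3[x + a] += c
--     # counts of f - (d + e), again from the pair-sum counter
--     rhs = Counter()
--     for f in values:
--         for x, c in s2.items():
--             rhs[f - x] += c
--     total = 0
--     for x, c in s3.items():
--         total += c * rhs.get(x, 0)
--     return total
-- ===== Notes on version B (the rewrite author's own statement) =====
-- stated objective: faster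
-- what changed: Instead of A's cubic triple loop to build the triple-sum counter and an O(distinct-triple-sums * n) final scan, B builds only the O(n^2) pair-sum counter once, obtains triple-sum counts by convolving it with the values, counts f-(d+e) the same way, and finishes with a single counter dot-product.
import Mathlib
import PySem

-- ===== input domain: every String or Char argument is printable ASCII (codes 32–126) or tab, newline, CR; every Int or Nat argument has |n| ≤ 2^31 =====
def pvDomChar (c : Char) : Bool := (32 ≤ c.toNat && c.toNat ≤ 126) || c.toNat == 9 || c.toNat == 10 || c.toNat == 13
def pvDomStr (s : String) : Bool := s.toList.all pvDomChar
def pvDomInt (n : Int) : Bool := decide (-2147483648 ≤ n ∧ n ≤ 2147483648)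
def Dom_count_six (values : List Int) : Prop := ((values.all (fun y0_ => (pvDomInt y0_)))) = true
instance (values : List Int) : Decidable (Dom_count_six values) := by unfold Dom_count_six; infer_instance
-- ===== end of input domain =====

-- B replaces A's cubic triple-sum loop and per-key rescans by one pair-sum counter convolved twice and a final counter dot-product.

-- ===== PORT A =====
def count_six (values : List Int) : Int :=
  let s3 := values.foldl (fun s3 a =>
    values.foldl (fun s3 b =>
      let ab := a + b
      values.foldl (fun s3 c => s3.modify (ab + c) 0 (· + 1)) s3) s3) PySem.Dict.empty
  let s2 := values.foldl (fun s2 d =>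
    values.foldl (fun s2 e => s2.modify (d + e) 0 (· + 1)) s2) PySem.Dict.empty
  s3.items.foldl (fun total p =>
    let m := values.foldl (fun m f => m + s2.getD (f - p.1) 0) 0
    total + p.2 * m) 0

-- ===== PORT B =====
def count_six_alt (values : List Int) : Int :=
  let s2 := values.foldl (fun s2 d =>
    values.foldl (fun s2 e => s2.modify (d + e) 0 (· + 1)) s2) PySem.Dict.empty
  let s3 := s2.items.foldl (fun s3 p =>
    values.foldl (fun s3 a => s3.modify (p.1 + a) 0 (· + p.2)) s3) PySem.Dict.empty
  let rhs := values.foldl (fun rhs f =>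
    s2.items.foldl (fun rhs p => rhs.modify (f - p.1) 0 (· + p.2)) rhs) PySem.Dict.empty
  s3.items.foldl (fun total p => total + p.2 * rhs.getD p.1 0) 0

-- ===== PRECONDITION & SPEC =====
def Spec_count_six (values : List Int) (out : Int) : Prop := out = count_six_alt values
instance (values : List Int) (out : Int) : Decidable (Spec_count_six values out) := by unfold Spec_count_six; infer_instance

-- ===== CLAIM (what is proved, stated in full; the proofs are below) =====
def Claim_equal_count_six : Prop := ∀ (values : List Int), Dom_count_six values → Spec_count_six values (count_six values)

-- ===== LEMMAS AND PROOFS =====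

-- the pair-sum and triple-sum multisets, as lists
def pvL2 (values : List Int) : List Int := values.flatMap (fun d => values.map (fun e => d + e))
def pvL3 (values : List Int) : List Int :=
  values.flatMap (fun a => values.flatMap (fun b => values.map (fun c => a + b + c)))

-- nested sums used as the common value language
def pvT (values : List Int) (v : Int) : Int :=
  (values.map (fun a => (values.map (fun b => (values.map (fun c => if a + b + c = v then (1:Int) else 0)).sum)).sum)).sum
def pvR (values : List Int) (v : Int) : Int :=
  (values.map (fun f => (values.map (fun d => (values.map (fun e => if f - (d + e) = v then (1:Int) else 0)).sum)).sum)).sum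

-- the shared s2 dict
def pvS2 (values : List Int) : PySem.Dict Int Int :=
  values.foldl (fun s2 d => values.foldl (fun s2 e => s2.modify (d + e) 0 (· + 1)) s2) PySem.Dict.empty

lemma pvS2_eq_counter (values : List Int) : pvS2 values = PySem.Dict.counter (pvL2 values) := by
  rw [PySem.Dict.counter_eq_foldl, pvL2, pvS2, List.foldl_flatMap]
  simp only [List.foldl_map]

lemma pvS3A_eq_counter (values : List Int) :
    values.foldl (fun s3 a => values.foldl (fun s3 b =>
      values.foldl (fun s3 c => s3.modify (a + b + c) 0 (· + 1)) s3) s3) PySem.Dict.empty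
    = PySem.Dict.counter (pvL3 values) := by
  rw [PySem.Dict.counter_eq_foldl, pvL3, List.foldl_flatMap]
  simp only [List.foldl_flatMap, List.foldl_map]

-- weighted counting fold over (key, weight) pairs
lemma pvWfold_getD (L : List (Int × Int)) (d : PySem.Dict Int Int) (v : Int) :
    (L.foldl (fun d q => d.modify q.1 0 (· + q.2)) d).getD v 0
      = d.getD v 0 + (L.map (fun q => if q.1 = v then q.2 else 0)).sum := by
  induction L generalizing d with
  | nil => simp
  | cons q t ih =>
      rw [List.foldl_cons, ih, List.map_cons, List.sum_cons, PySem.Dict.getD_modify]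
      by_cases h : v = q.1
      · subst h; simp; ring
      · rw [if_neg h, if_neg (fun he => h he.symm)]; ring

lemma pvSum_flatMap {α : Type} (l : List α) (h : α → List Int) :
    (l.flatMap h).sum = (l.map (fun x => (h x).sum)).sum := by
  induction l with
  | nil => simp
  | cons x t ih => simp [ih]

lemma pvSum_single (K : List Int) (g : Int → Int) (hK : K.Nodup) (y : Int) (hy : y ∈ K) :
    (K.map (fun k => if k = y then g k else 0)).sum = g y := by
  induction K with
  | nil => simp at hy
  | cons k t ih =>
      rcases List.mem_cons.mp hy with h | h
      · subst h
        rw [List.map_cons, List.sum_cons, if_pos rfl]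
        have hz : (t.map (fun k' => if k' = y then g k' else 0)).sum = 0 := by
          apply List.sum_eq_zero
          intro x hx
          rcases List.mem_map.mp hx with ⟨k', hk', hk'x⟩
          have : k' ≠ y := fun he => (List.nodup_cons.mp hK).1 (he ▸ hk')
          rw [if_neg this] at hk'x; exact hk'x.symm
        rw [hz, add_zero]
      · have hky : k ≠ y := fun he => (List.nodup_cons.mp hK).1 (he ▸ h)
        rw [List.map_cons, List.sum_cons, if_neg hky, zero_add]
        exact ih (List.nodup_cons.mp hK).2 h

-- sum over a nodup key list weighted by occurrence counts = sum over the underlying list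
lemma pvSum_dedup (K : List Int) (hK : K.Nodup) (g : Int → Int) :
    ∀ (L : List Int), (∀ y ∈ L, y ∈ K) →
      (K.map (fun k => (L.count k : Int) * g k)).sum = (L.map g).sum := by
  intro L
  induction L with
  | nil => intro _; simp
  | cons y t ih =>
      intro hmem
      have h1 : ∀ z ∈ t, z ∈ K := fun z hz => hmem z (List.mem_cons_of_mem _ hz)
      have hy : y ∈ K := hmem y List.mem_cons_self
      have hsplit : ∀ k : Int, ((List.count k (y :: t) : Int) * g k)
          = (List.count k t : Int) * g k + (if k = y then g k else 0) := by
        intro k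
        simp only [List.count_cons, beq_iff_eq]
        by_cases h : k = y
        · subst h; rw [if_pos rfl, if_pos rfl]; push_cast; ring
        · rw [if_neg (fun he => h he.symm), if_neg h]; push_cast; ring
      calc (K.map (fun k => (List.count k (y :: t) : Int) * g k)).sum
          = (K.map (fun k => (List.count k t : Int) * g k + (if k = y then g k else 0))).sum := by
            apply congrArg; exact List.map_congr_left (fun k _ => hsplit k)
        _ = (K.map (fun k => (List.count k t : Int) * g k)).sum
              + (K.map (fun k => if k = y then g k else 0)).sum := PySem.List.sum_map_add_int K _ _
        _ = (t.map g).sum + g y := by rw [ih h1, pvSum_single K g hK y hy]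
        _ = ((y :: t).map g).sum := by rw [List.map_cons, List.sum_cons]; ring

lemma pvSum_ite_const (l : List Int) (P : Int → Prop) [DecidablePred P] (c : Int) :
    (l.map (fun a => if P a then c else 0)).sum = c * (l.map (fun a => if P a then (1:Int) else 0)).sum := by
  rw [← PySem.List.sum_map_const_mul_int]
  apply congrArg
  exact List.map_congr_left (fun a _ => by by_cases h : P a <;> simp [h])

-- count in L2 as a nested sum
lemma pvCount_L2 (values : List Int) (v : Int) :
    ((pvL2 values).count v : Int)
      = (values.map (fun d => (values.map (fun e => if d + e = v then (1:Int) else 0)).sum)).sum := by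
  have h1 : (PySem.Dict.counter (pvL2 values)).getD v 0 = ((pvL2 values).count v : Int) :=
    PySem.Dict.getD_counter _ v
  have h2 : pvS2 values
      = (values.flatMap (fun d => values.map (fun e => (d + e, (1:Int))))).foldl
          (fun d q => d.modify q.1 0 (· + q.2)) PySem.Dict.empty := by
    rw [pvS2, List.foldl_flatMap]
    simp only [List.foldl_map]
  rw [← pvS2_eq_counter] at h1
  rw [h2, pvWfold_getD] at h1
  rw [← h1]
  simp only [PySem.Dict.getD_empty, zero_add, List.map_flatMap, pvSum_flatMap, List.map_map]
  rfl

lemma pvCount_L3 (values : List Int) (v : Int) :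
    ((pvL3 values).count v : Int) = pvT values v := by
  have h1 : (PySem.Dict.counter (pvL3 values)).getD v 0 = ((pvL3 values).count v : Int) :=
    PySem.Dict.getD_counter _ v
  have h2 : values.foldl (fun s3 a => values.foldl (fun s3 b =>
      values.foldl (fun s3 c => s3.modify (a + b + c) 0 (· + 1)) s3) s3) PySem.Dict.empty
      = (values.flatMap (fun a => values.flatMap (fun b =>
          values.map (fun c => (a + b + c, (1:Int)))))).foldl
          (fun d q => d.modify q.1 0 (· + q.2)) PySem.Dict.empty := by
    simp only [List.foldl_flatMap, List.foldl_map]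
  rw [← pvS3A_eq_counter, h2, pvWfold_getD] at h1
  rw [← h1, pvT]
  simp only [PySem.Dict.getD_empty, zero_add, List.map_flatMap, pvSum_flatMap, List.map_map]
  rfl

-- B's s3 dict: value characterization
lemma pvS3B_getD (values : List Int) (v : Int) :
    ((pvS2 values).items.foldl (fun s3 p =>
        values.foldl (fun s3 a => s3.modify (p.1 + a) 0 (· + p.2)) s3) PySem.Dict.empty).getD v 0
      = pvT values v := by
  have hflat : (pvS2 values).items.foldl (fun s3 p =>
        values.foldl (fun s3 a => s3.modify (p.1 + a) 0 (· + p.2)) s3) PySem.Dict.empty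
      = ((pvS2 values).items.flatMap (fun p => values.map (fun a => (p.1 + a, p.2)))).foldl
          (fun d q => d.modify q.1 0 (· + q.2)) PySem.Dict.empty := by
    simp only [List.foldl_flatMap, List.foldl_map]
  rw [hflat, pvWfold_getD, PySem.Dict.getD_empty, zero_add,
      pvS2_eq_counter, PySem.Dict.items_counter]
  simp only [List.map_flatMap, pvSum_flatMap, List.map_map]
  have hstep : ∀ k : Int,
      (values.map (fun a => if k + a = v then ((pvL2 values).count k : Int) else 0)).sum
        = ((pvL2 values).count k : Int) * (values.map (fun a => if k + a = v then (1:Int) else 0)).sum := by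
    intro k; exact pvSum_ite_const values (fun a => k + a = v) _
  calc ((PySem.Set.ofList (pvL2 values)).map
          (fun k => ((fun p : Int × Int => values.map (fun a => if p.1 + a = v then p.2 else 0)) (k, ((pvL2 values).count k : Int))).sum)).sum
      = ((PySem.Set.ofList (pvL2 values)).map
          (fun k => ((pvL2 values).count k : Int) * (values.map (fun a => if k + a = v then (1:Int) else 0)).sum)).sum := by
        apply congrArg; exact List.map_congr_left (fun k _ => hstep k)
    _ = ((pvL2 values).map (fun y => (values.map (fun a => if y + a = v then (1:Int) else 0)).sum)).sum := by
        exact pvSum_dedup _ (PySem.Set.nodup_ofList _) _ (pvL2 values)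
          (fun y hy => (PySem.Set.mem_ofList _ _).mpr hy)
    _ = pvT values v := by
        rw [pvL2, pvT, List.map_flatMap]
        simp only [pvSum_flatMap, List.map_map]
        rfl

-- B's rhs dict: value characterization
lemma pvRhs_getD (values : List Int) (v : Int) :
    (values.foldl (fun rhs f =>
        (pvS2 values).items.foldl (fun rhs p => rhs.modify (f - p.1) 0 (· + p.2)) rhs)
        PySem.Dict.empty).getD v 0
      = pvR values v := by
  have hflat : values.foldl (fun rhs f =>
        (pvS2 values).items.foldl (fun rhs p => rhs.modify (f - p.1) 0 (· + p.2)) rhs)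
        PySem.Dict.empty
      = (values.flatMap (fun f => (pvS2 values).items.map (fun p => (f - p.1, p.2)))).foldl
          (fun d q => d.modify q.1 0 (· + q.2)) PySem.Dict.empty := by
    simp only [List.foldl_flatMap, List.foldl_map]
  rw [hflat, pvWfold_getD, PySem.Dict.getD_empty, zero_add,
      pvS2_eq_counter, PySem.Dict.items_counter]
  simp only [List.map_flatMap, pvSum_flatMap, List.map_map]
  rw [pvR]
  apply congrArg
  apply List.map_congr_left
  intro f _
  calc ((PySem.Set.ofList (pvL2 values)).map
          (fun k => if f - k = v then ((pvL2 values).count k : Int) else 0)).sum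
      = ((PySem.Set.ofList (pvL2 values)).map
          (fun k => ((pvL2 values).count k : Int) * (if f - k = v then (1:Int) else 0))).sum := by
        apply congrArg; apply List.map_congr_left
        intro k _; by_cases h : f - k = v <;> simp [h]
    _ = ((pvL2 values).map (fun y => if f - y = v then (1:Int) else 0)).sum := by
        exact pvSum_dedup _ (PySem.Set.nodup_ofList _) _ (pvL2 values)
          (fun y hy => (PySem.Set.mem_ofList _ _).mpr hy)
    _ = (values.map (fun d => (values.map (fun e => if f - (d + e) = v then (1:Int) else 0)).sum)).sum := by
        rw [pvL2, List.map_flatMap]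
        simp only [pvSum_flatMap, List.map_map]
        rfl

-- A's inner rescan equals pvR
lemma pvM_eq_R (values : List Int) (k : Int) :
    (values.map (fun f => (pvS2 values).getD (f - k) 0)).sum = pvR values k := by
  rw [pvR]
  apply congrArg
  apply List.map_congr_left
  intro f _
  rw [pvS2_eq_counter, PySem.Dict.getD_counter, pvCount_L2]
  apply congrArg
  apply List.map_congr_left
  intro d _
  apply congrArg
  apply List.map_congr_left
  intro e _
  have : (d + e = f - k) ↔ (f - (d + e) = k) := by omega
  simp only [this]

-- the two key lists are permutations of each other
lemma pvKeys_perm (values : List Int) :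
    (PySem.Set.ofList ((((pvS2 values).items.flatMap
        (fun p => values.map (fun a => (p.1 + a, p.2)))).map Prod.fst)) : List Int).Perm
      (PySem.Set.ofList (pvL3 values)) := by
  apply (List.perm_ext_iff_of_nodup (PySem.Set.nodup_ofList _) (PySem.Set.nodup_ofList _)).mpr
  intro k
  rw [pvS2_eq_counter, PySem.Dict.items_counter, pvL3, pvL2]
  simp only [PySem.Set.mem_ofList, List.mem_map, List.mem_flatMap, Prod.exists]
  constructor
  · rintro ⟨a, b, ⟨a1, b1, ⟨y, ⟨d, hd, e, he, rfl⟩, heq⟩, a2, ha2, heq2⟩, rfl⟩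
    injection heq with h1 h2
    injection heq2 with h3 h4
    subst h1
    subst h3
    exact ⟨d, hd, e, he, a2, ha2, rfl⟩
  · rintro ⟨a, ha, b, hb, c, hc, rfl⟩
    exact ⟨a + b + c,
      ((List.count (a + b) (List.flatMap (fun d => List.map (fun e => d + e) values) values) : Nat) : Int),
      ⟨a + b, ((List.count (a + b) (List.flatMap (fun d => List.map (fun e => d + e) values) values) : Nat) : Int),
        ⟨a + b, ⟨a, ha, b, hb, rfl⟩, rfl⟩, c, hc, rfl⟩, rfl⟩

-- B's nested s3 loop flattened to a single weighted fold
lemma pvS3B_flat (values : List Int) :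
    (pvS2 values).items.foldl (fun s3 p =>
        values.foldl (fun s3 a => s3.modify (p.1 + a) 0 (· + p.2)) s3) PySem.Dict.empty
      = ((pvS2 values).items.flatMap (fun p => values.map (fun a => (p.1 + a, p.2)))).foldl
          (fun d q => d.modify q.1 0 (· + q.2)) PySem.Dict.empty := by
  simp only [List.foldl_flatMap, List.foldl_map]

lemma pvA_eval (values : List Int) :
    count_six values
      = ((PySem.Set.ofList (pvL3 values)).map
          (fun k => ((pvL3 values).count k : Int) * pvR values k)).sum := by
  have hs2 : values.foldl (fun s2 d =>
      values.foldl (fun s2 e => s2.modify (d + e) 0 (· + 1)) s2) PySem.Dict.empty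
      = pvS2 values := rfl
  simp only [count_six]
  rw [pvS3A_eq_counter]
  simp only [hs2]
  rw [PySem.Dict.items_counter, PySem.List.foldl_add, zero_add, List.map_map]
  apply congrArg
  apply List.map_congr_left
  intro k _
  simp only [Function.comp]
  rw [PySem.List.foldl_add, zero_add, pvM_eq_R]

lemma pvB_eval (values : List Int) :
    count_six_alt values
      = ((PySem.Set.ofList (((pvS2 values).items.flatMap
            (fun p => values.map (fun a => (p.1 + a, p.2)))).map Prod.fst)).map
          (fun k => pvT values k * pvR values k)).sum := by
  have hs2 : values.foldl (fun s2 d =>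
      values.foldl (fun s2 e => s2.modify (d + e) 0 (· + 1)) s2) PySem.Dict.empty
      = pvS2 values := rfl
  simp only [count_six_alt]
  simp only [hs2]
  have hnodup : ((pvS2 values).items.foldl (fun s3 p =>
      values.foldl (fun s3 a => s3.modify (p.1 + a) 0 (· + p.2)) s3) PySem.Dict.empty).keys.Nodup := by
    rw [pvS3B_flat]
    exact PySem.Dict.nodup_keys_foldl_modify_key _ Prod.fst 0 (fun _ q => (· + q.2)) _
      PySem.Dict.nodup_keys_empty
  have hkeys : ((pvS2 values).items.foldl (fun s3 p =>
      values.foldl (fun s3 a => s3.modify (p.1 + a) 0 (· + p.2)) s3) PySem.Dict.empty).keys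
      = PySem.Set.ofList (((pvS2 values).items.flatMap
          (fun p => values.map (fun a => (p.1 + a, p.2)))).map Prod.fst) := by
    rw [pvS3B_flat, PySem.Dict.keys_foldl_modify_key _ Prod.fst 0 (fun _ q => (· + q.2))]
    simp [PySem.Set.update_nil_left]
  rw [PySem.List.foldl_add, zero_add,
      PySem.Dict.items_eq_map_keys _ hnodup 0, hkeys, List.map_map]
  apply congrArg
  apply List.map_congr_left
  intro k _
  simp only [Function.comp]
  rw [pvS3B_getD, pvRhs_getD]

theorem pvMain (values : List Int) : count_six values = count_six_alt values := by
  rw [pvA_eval, pvB_eval]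
  have h1 : ∀ k ∈ PySem.Set.ofList (pvL3 values),
      ((pvL3 values).count k : Int) * pvR values k = pvT values k * pvR values k :=
    fun k _ => by rw [pvCount_L3]
  rw [List.map_congr_left h1]
  exact (((pvKeys_perm values).map _).sum_eq).symm

-- ===== VERDICT (by name: the statement is the Claim_ definition above) =====
theorem count_six_spec : Claim_equal_count_six := by
  intro values _
  unfold Spec_count_six
  exact pvMain values
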